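-- pv_equiv track=rewrite | github.com/anantgirdhar/advent-of-code | 2023/day02.py | find_possible_games
-- ===== SOURCE A (Python) =====
-- def find_possible_games(games, maxR, maxG, maxB):
--     """Find which games are possible
--
--     A game is possible if the number of balls of each color does not exceed the
--     maximum number of balls available in the bag.
--     """
--     possible_games = []
--     for game_id, subsets in games.items():
--         for (R, G, B) in subsets:
--             if R > maxR or G > maxG or B > maxB:
--                 # This is an infeasible game
--                 break
--         else:
--             possible_games.append(game_id)
--     return possible_games
-- ===== SOURCE B (Python) =====
-- def find_possible_games(games, maxR, maxG, maxB):
--     """Find which games are possible (set-of-infeasible-ids formulation)."""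
--     infeasible = {game_id
--                   for game_id, subsets in games.items()
--                   for (R, G, B) in subsets
--                   if R > maxR or G > maxG or B > maxB}
--     return [game_id for game_id in games if game_id not in infeasible]
-- ===== Notes on version B (the rewrite author's own statement) =====
-- stated objective: alternative
-- what changed: B first collects the set of infeasible game ids in one comprehension over all subsets (no early break), then filters the dict's keys by set membership, instead of A's per-game loop with break/else; Pre_ only requires distinct game ids, which every Python dict satisfies, so no realizable input is excluded.
import Mathlib
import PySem

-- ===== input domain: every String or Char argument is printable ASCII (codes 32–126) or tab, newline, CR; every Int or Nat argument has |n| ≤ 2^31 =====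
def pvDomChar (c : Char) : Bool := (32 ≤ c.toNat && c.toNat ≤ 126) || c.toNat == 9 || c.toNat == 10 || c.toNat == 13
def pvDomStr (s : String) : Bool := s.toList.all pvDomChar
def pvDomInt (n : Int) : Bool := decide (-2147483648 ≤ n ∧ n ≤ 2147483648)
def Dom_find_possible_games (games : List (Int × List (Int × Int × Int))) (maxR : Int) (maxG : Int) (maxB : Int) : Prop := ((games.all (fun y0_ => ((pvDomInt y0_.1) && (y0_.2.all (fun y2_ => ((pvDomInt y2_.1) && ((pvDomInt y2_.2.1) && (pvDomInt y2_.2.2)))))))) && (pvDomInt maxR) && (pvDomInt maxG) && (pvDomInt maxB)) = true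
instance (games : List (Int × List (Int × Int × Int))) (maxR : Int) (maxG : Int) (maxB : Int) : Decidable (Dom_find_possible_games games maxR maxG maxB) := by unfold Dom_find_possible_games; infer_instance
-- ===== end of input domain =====

-- B collects the infeasible game ids in a set in one pass, then filters the keys; same cost, different decomposition.

-- ===== PORT A =====
-- inner 'for (R, G, B) in subsets: … break / else' loop: true = no break (feasible)
def fpgCheck (maxR maxG maxB : Int) : List (Int × Int × Int) → Bool
  | [] => true
  | t :: rest => if t.1 > maxR || t.2.1 > maxG || t.2.2 > maxB then false else fpgCheck maxR maxG maxB rest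

def find_possible_games (games : List (Int × List (Int × Int × Int))) (maxR : Int) (maxG : Int) (maxB : Int) : List Int :=
  games.foldl (fun acc p => if fpgCheck maxR maxG maxB p.2 then acc ++ [p.1] else acc) []

-- ===== PORT B =====
-- the set comprehension {game_id for game_id, subsets in games.items() for (R,G,B) in subsets if R>maxR or G>maxG or B>maxB}
def fpgInfeasible (games : List (Int × List (Int × Int × Int))) (maxR : Int) (maxG : Int) (maxB : Int) : PySem.Set Int :=
  games.foldl
    (fun s p => p.2.foldl
      (fun s' t => if t.1 > maxR || t.2.1 > maxG || t.2.2 > maxB then PySem.Set.add s' p.1 else s') s)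
    PySem.Set.empty

def find_possible_games_alt (games : List (Int × List (Int × Int × Int))) (maxR : Int) (maxG : Int) (maxB : Int) : List Int :=
  (games.map (·.1)).filter (fun gid => !(PySem.Set.contains (fpgInfeasible games maxR maxG maxB) gid))

-- ===== PRECONDITION & SPEC =====
-- Pre_ requires the game ids to be distinct, which every input arising from a Python dict satisfies
-- (dict keys are unique); it excludes no realizable Python input.
def Pre_find_possible_games (games : List (Int × List (Int × Int × Int))) (maxR : Int) (maxG : Int) (maxB : Int) : Prop :=
  (games.map (·.1)).Nodup
instance (games : List (Int × List (Int × Int × Int))) (maxR : Int) (maxG : Int) (maxB : Int) : Decidable (Pre_find_possible_games games maxR maxG maxB) := by unfold Pre_find_possible_games; infer_instance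

def pvWitness_find_possible_games : (List (Int × List (Int × Int × Int))) × Int × Int × Int :=
  ([(1, [(1, 1, 1)]), (2, [(5, 0, 0)])], 4, 4, 4)

def Spec_find_possible_games (games : List (Int × List (Int × Int × Int))) (maxR : Int) (maxG : Int) (maxB : Int) (out : List Int) : Prop := out = find_possible_games_alt games maxR maxG maxB
instance (games : List (Int × List (Int × Int × Int))) (maxR : Int) (maxG : Int) (maxB : Int) (out : List Int) : Decidable (Spec_find_possible_games games maxR maxG maxB out) := by unfold Spec_find_possible_games; infer_instance

-- ===== CLAIM (what is proved, stated in full; the proofs are below) =====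
def Claim_equal_find_possible_games : Prop := ∀ (games : List (Int × List (Int × Int × Int))) (maxR : Int) (maxG : Int) (maxB : Int), Dom_find_possible_games games maxR maxG maxB → Pre_find_possible_games games maxR maxG maxB → Spec_find_possible_games games maxR maxG maxB (find_possible_games games maxR maxG maxB)

-- ===== LEMMAS AND PROOFS =====

-- A's foldl unfolded to filter-then-map
theorem fpgA_foldl (maxR maxG maxB : Int) (games : List (Int × List (Int × Int × Int))) (acc : List Int) :
    games.foldl (fun acc p => if fpgCheck maxR maxG maxB p.2 then acc ++ [p.1] else acc) acc
      = acc ++ (games.filter (fun p => fpgCheck maxR maxG maxB p.2)).map (·.1) := by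
  induction games generalizing acc with
  | nil => simp
  | cons p rest ih =>
    simp only [List.foldl_cons, List.filter_cons]
    by_cases h : fpgCheck maxR maxG maxB p.2 = true
    · simp [h, ih]
    · simp [h, ih]

-- membership in the inner fold over one game's subsets
theorem fpgInner_mem (maxR maxG maxB gid x : Int) (subs : List (Int × Int × Int)) (s : PySem.Set Int) :
    (x ∈ subs.foldl (fun s' t => if t.1 > maxR || t.2.1 > maxG || t.2.2 > maxB then PySem.Set.add s' gid else s') s)
      ↔ x ∈ s ∨ (x = gid ∧ fpgCheck maxR maxG maxB subs = false) := by
  induction subs generalizing s with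
  | nil => simp [fpgCheck]
  | cons t rest ih =>
    simp only [List.foldl_cons, fpgCheck]
    by_cases h : (t.1 > maxR || t.2.1 > maxG || t.2.2 > maxB) = true
    · simp only [h, if_true]
      rw [ih]
      simp [PySem.Set.mem_add]
      tauto
    · simp only [h]
      rw [ih]
      simp

-- membership in the infeasible set
theorem fpgInfeasible_gen (maxR maxG maxB x : Int) (gs : List (Int × List (Int × Int × Int))) (s : PySem.Set Int) :
    x ∈ gs.foldl (fun s p => p.2.foldl
        (fun s' t => if t.1 > maxR || t.2.1 > maxG || t.2.2 > maxB then PySem.Set.add s' p.1 else s') s) s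
      ↔ x ∈ s ∨ ∃ p ∈ gs, p.1 = x ∧ fpgCheck maxR maxG maxB p.2 = false := by
  induction gs generalizing s with
  | nil => simp
  | cons p rest ih =>
    simp only [List.foldl_cons]
    rw [ih, fpgInner_mem]
    simp only [List.mem_cons]
    constructor
    · rintro ((hs | ⟨h1, h2⟩) | ⟨q, hq, h1, h2⟩)
      · exact Or.inl hs
      · exact Or.inr ⟨p, Or.inl rfl, h1.symm, h2⟩
      · exact Or.inr ⟨q, Or.inr hq, h1, h2⟩
    · rintro (hs | ⟨q, (rfl | hq), h1, h2⟩)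
      · exact Or.inl (Or.inl hs)
      · exact Or.inl (Or.inr ⟨h1.symm, h2⟩)
      · exact Or.inr ⟨q, hq, h1, h2⟩

theorem fpgInfeasible_mem (games : List (Int × List (Int × Int × Int))) (maxR maxG maxB x : Int) :
    x ∈ fpgInfeasible games maxR maxG maxB
      ↔ ∃ p ∈ games, p.1 = x ∧ fpgCheck maxR maxG maxB p.2 = false := by
  unfold fpgInfeasible
  rw [fpgInfeasible_gen]
  simp [PySem.Set.empty]

-- ===== VERDICT (by name: the statement is the Claim_ definition above) =====
theorem find_possible_games_spec : Claim_equal_find_possible_games := by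
  intro games maxR maxG maxB _ hpre
  unfold Spec_find_possible_games find_possible_games find_possible_games_alt
  rw [fpgA_foldl, List.nil_append, List.filter_map]
  congr 1
  apply List.filter_congr
  intro p hp
  simp only [Function.comp]
  have hmem : (p.1 ∈ fpgInfeasible games maxR maxG maxB)
      ↔ fpgCheck maxR maxG maxB p.2 = false := by
    rw [fpgInfeasible_mem]
    constructor
    · rintro ⟨q, hq, h1, h2⟩
      have : q = p := List.inj_on_of_nodup_map hpre hq hp h1
      rwa [this] at h2
    · exact fun h => ⟨p, hp, rfl, h⟩
  by_cases h : fpgCheck maxR maxG maxB p.2 = true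
  · have : ¬ p.1 ∈ fpgInfeasible games maxR maxG maxB := by simp [hmem, h]
    simp [h, PySem.Set.contains, this]
  · have : p.1 ∈ fpgInfeasible games maxR maxG maxB := hmem.mpr (by simpa using h)
    simp only [Bool.not_eq_true] at h
    simp [h, PySem.Set.contains, this]
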